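-- pv_equiv track=rewrite | github.com/777aker/Algorithms-class | Kelley-Kelley-PS10b-Q1.py | commonSubstrings
-- ===== SOURCE A (Python) =====
-- def commonSubstrings(x, L, a):
--     # this saves the solution
--     solution = []
--     # this saves the x position we are since an insert means x will
--     # be offset from a by one
--     xpos = 0
--     # save the a position we are at
--     i = 0
--     # go through everything in a
--     while i < len(a):
--         # this is the possible substring that we might append to solution
--         # if it ends up being >= L
--         possible = []
--         # this is the number of no ops we have / length of the common
--         # substring
--         ops = 0
--         # while i is less than the length of a and a[i] is a no-op
--         while i < len(a) and a[i] == 'no-op':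
--             # add to the number of no ops
--             ops += 1
--             # add the x we are at to possible substring
--             possible.append(x[xpos])
--             # increment i and xpos
--             i += 1
--             xpos += 1
--         # if the number of ops we did on the substring are >= L then
--         # append the substring to the solution
--         if ops >= L:
--             solution.append(possible)
--         # if a is an insert then decrement x pos to counteract the offset
--         # an insert creates
--         if i < len(a) and a[i] == 'insert':
--             xpos -= 1
--         # increment i and xpos
--         i += 1
--         xpos += 1
--     # return our solution which is a list of common substrings
--     return solution
-- ===== SOURCE B (Python) =====
-- def commonSubstrings(x, L, a):
--     # One pass over a building a table of (start_xpos, length) for each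
--     # maximal run of 'no-op' tokens (an empty entry per delimiter token),
--     # then a comprehension indexes x to emit the qualifying substrings.
--     parts = []
--     cur = 0      # length of the current no-op run
--     start = 0    # xpos at which the current run began
--     xpos = 0     # number of non-insert tokens seen so far
--     for tok in a:
--         if tok == 'no-op':
--             cur += 1
--             xpos += 1
--         else:
--             parts.append((start, cur))
--             cur = 0
--             if tok != 'insert':
--                 xpos += 1
--             start = xpos
--     if cur > 0:
--         parts.append((start, cur))
--     return [[x[s + k] for k in range(n)] for (s, n) in parts if n >= L]
-- ===== Notes on version B (the rewrite author's own statement) =====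
-- stated objective: simpler
-- what changed: Replaces A's nested while loops with a mutable xpos/i cursor and per-run buffer by a single pass that tabulates (start-xpos, length) of every maximal 'no-op' run, followed by one comprehension over that table that indexes x to emit the qualifying substrings.
import Mathlib
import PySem

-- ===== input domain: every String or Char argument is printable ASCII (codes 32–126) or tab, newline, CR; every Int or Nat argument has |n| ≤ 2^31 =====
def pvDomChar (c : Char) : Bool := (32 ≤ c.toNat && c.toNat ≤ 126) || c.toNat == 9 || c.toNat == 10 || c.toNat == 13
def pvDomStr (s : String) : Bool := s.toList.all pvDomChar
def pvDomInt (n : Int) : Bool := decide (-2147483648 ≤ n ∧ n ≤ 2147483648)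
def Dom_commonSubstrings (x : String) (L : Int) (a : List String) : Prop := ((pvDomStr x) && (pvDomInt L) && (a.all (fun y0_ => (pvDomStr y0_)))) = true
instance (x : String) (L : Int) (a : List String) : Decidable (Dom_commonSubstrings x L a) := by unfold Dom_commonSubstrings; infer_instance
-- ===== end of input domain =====

-- B replaces A's nested while loops (mutable xpos/i cursor and per-run buffer) by one pass that
-- tabulates (start-xpos, length) of every maximal 'no-op' run, then a comprehension over that
-- table emits the qualifying substrings; objective: simpler.

-- x[i] as a 1-character string (Python raises IndexError out of range; Pre_ excludes that, the
-- port returns "" there)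
def pvChar (x : String) (i : Int) : String :=
  match PySem.List.pyGet? x.toList i with
  | some c => String.mk [c]
  | none => ""

-- ===== PORT A =====
-- the inner `while i < len(a) and a[i] == 'no-op'` loop, over the remaining suffix of a;
-- state (xpos, ops, possible); returns (remaining suffix, xpos, ops, possible)
def innerA (x : String) (rest : List String) (xpos ops : Int) (possible : List String) :
    List String × Int × Int × List String :=
  match rest with
  | [] => ([], xpos, ops, possible)
  | tok :: rest' =>
    if tok = "no-op" then
      innerA x rest' (xpos + 1) (ops + 1) (possible ++ [pvChar x xpos])
    else (tok :: rest', xpos, ops, possible)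

-- the outer `while i < len(a)` loop; each iteration consumes at least one token of rest, so
-- fuel = initial length of a bounds the number of iterations (proved in the lemmas below)
def outerA (x : String) (L : Int) (fuel : Nat) (rest : List String) (xpos : Int)
    (sol : List (List String)) : List (List String) :=
  match fuel with
  | 0 => sol
  | .succ fuel =>
    match rest with
    | [] => sol
    | tok :: rest0 =>
      match innerA x (tok :: rest0) xpos 0 [] with
      | (restl, xpos1, ops, possible) =>
        let sol' := if L ≤ ops then sol ++ [possible] else sol
        match restl with
        | [] => sol'
        | tok2 :: rest' =>
          outerA x L fuel rest' ((if tok2 = "insert" then xpos1 - 1 else xpos1) + 1) sol'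

def commonSubstrings (x : String) (L : Int) (a : List String) : List (List String) :=
  outerA x L a.length a 0 []

-- ===== PORT B =====
-- one pass over a: state (parts, cur, xpos, start) exactly as in Source B's for-loop
def bLoop (parts : List (Int × Int)) (cur xpos start : Int) :
    List String → List (Int × Int) × Int × Int × Int
  | [] => (parts, cur, xpos, start)
  | tok :: rest =>
    if tok = "no-op" then bLoop parts (cur + 1) (xpos + 1) start rest
    else
      let xpos' := if tok = "insert" then xpos else xpos + 1
      bLoop (parts ++ [(start, cur)]) 0 xpos' xpos' rest

-- `[x[s + k] for k in range(n)]`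
def pvEmit (x : String) (s n : Int) : List String :=
  (PySem.List.pyRange 0 n 1).map (fun k => pvChar x (s + k))

def commonSubstrings_alt (x : String) (L : Int) (a : List String) : List (List String) :=
  match bLoop [] 0 0 0 a with
  | (parts, cur, _, start) =>
    let parts' := if cur > 0 then parts ++ [(start, cur)] else parts
    (parts'.filter (fun p => L ≤ p.2)).map (fun p => pvEmit x p.1 p.2)

-- ===== PRECONDITION & SPEC =====
-- Pre_ excludes exactly the inputs where A raises IndexError: some 'no-op' token of a sits at an
-- x-position (count of preceding non-'insert' tokens) at or beyond the end of x.
def Pre_commonSubstrings (x : String) (L : Int) (a : List String) : Prop :=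
  ∀ i : Fin a.length, a[i.1] = "no-op" →
    ((a.take i.1).filter (fun t => t ≠ "insert")).length < x.toList.length
instance (x : String) (L : Int) (a : List String) : Decidable (Pre_commonSubstrings x L a) := by
  unfold Pre_commonSubstrings; infer_instance

def pvWitness_commonSubstrings : String × Int × List String :=
  ("abc", 2, ["no-op", "insert", "no-op", "no-op"])

def Spec_commonSubstrings (x : String) (L : Int) (a : List String) (out : List (List String)) : Prop := out = commonSubstrings_alt x L a
instance (x : String) (L : Int) (a : List String) (out : List (List String)) : Decidable (Spec_commonSubstrings x L a out) := by unfold Spec_commonSubstrings; infer_instance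

-- ===== CLAIM (what is proved, stated in full; the proofs are below) =====
def Claim_equal_commonSubstrings : Prop := ∀ (x : String) (L : Int) (a : List String), Dom_commonSubstrings x L a → Pre_commonSubstrings x L a → Spec_commonSubstrings x L a (commonSubstrings x L a)

-- ===== LEMMAS AND PROOFS =====

-- emitted solution so far, as a function of B's part table
def emitAll (x : String) (L : Int) (parts : List (Int × Int)) : List (List String) :=
  (parts.filter (fun p => L ≤ p.2)).map (fun p => pvEmit x p.1 p.2)

theorem emitAll_append (x : String) (L : Int) (parts : List (Int × Int)) (s n : Int) :
    emitAll x L (parts ++ [(s, n)]) =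
      emitAll x L parts ++ (if L ≤ n then [pvEmit x s n] else []) := by
  simp only [emitAll, List.filter_append, List.map_append]
  split <;> simp_all

-- characterisation of the inner while loop: it consumes the maximal leading 'no-op' run
theorem innerA_spec (x : String) (rest : List String) (xpos ops : Int) (possible : List String) :
    innerA x rest xpos ops possible =
      (rest.dropWhile (fun t => t == "no-op"),
       xpos + (rest.takeWhile (fun t => t == "no-op")).length,
       ops + (rest.takeWhile (fun t => t == "no-op")).length,
       possible ++ (List.range (rest.takeWhile (fun t => t == "no-op")).length).map
         (fun (k : Nat) => pvChar x (xpos + (k : Int)))) := by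
  induction rest generalizing xpos ops possible with
  | nil => simp [innerA]
  | cons tok rest' ih =>
    by_cases htok : tok = "no-op"
    · have hlen : ((tok :: rest').takeWhile (fun t => t == "no-op")).length
          = (rest'.takeWhile (fun t => t == "no-op")).length + 1 := by
        simp [List.takeWhile_cons, htok]
      have hdrop : (tok :: rest').dropWhile (fun t => t == "no-op")
          = rest'.dropWhile (fun t => t == "no-op") := by
        simp [List.dropWhile_cons, htok]
      have h2 : xpos + 1 + ((rest'.takeWhile (fun t => t == "no-op")).length : Int)
          = xpos + (((rest'.takeWhile (fun t => t == "no-op")).length + 1 : Nat) : Int) := by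
        push_cast; ring
      have h3 : ops + 1 + ((rest'.takeWhile (fun t => t == "no-op")).length : Int)
          = ops + (((rest'.takeWhile (fun t => t == "no-op")).length + 1 : Nat) : Int) := by
        push_cast; ring
      have hlist : (possible ++ [pvChar x xpos]) ++
            (List.range (rest'.takeWhile (fun t => t == "no-op")).length).map
              (fun (k : Nat) => pvChar x (xpos + 1 + (k : Int)))
          = possible ++
            (List.range ((rest'.takeWhile (fun t => t == "no-op")).length + 1)).map
              (fun (k : Nat) => pvChar x (xpos + (k : Int))) := by
        rw [List.append_assoc, List.singleton_append, List.range_succ_eq_map, List.map_cons,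
          List.map_map]
        rw [List.append_right_inj, List.cons_eq_cons]
        refine ⟨by norm_num, ?_⟩
        refine List.map_congr_left (fun k _ => ?_)
        simp only [Function.comp_apply]
        congr 1
        push_cast
        ring
      rw [innerA, if_pos htok, ih, hlen, hdrop, h2, h3, hlist]
    · have hb : (tok == "no-op") = false := by simp [htok]
      rw [innerA, if_neg htok]
      simp [List.takeWhile_cons, List.dropWhile_cons, hb]

-- bLoop also consumes a maximal leading 'no-op' run, adding its length to cur and xpos
theorem bLoop_run (rest : List String) (parts : List (Int × Int))
    (cur xpos start : Int) :
    bLoop parts cur xpos start rest =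
      bLoop parts (cur + (rest.takeWhile (fun t => t == "no-op")).length)
        (xpos + (rest.takeWhile (fun t => t == "no-op")).length) start
        (rest.dropWhile (fun t => t == "no-op")) := by
  induction rest generalizing cur xpos with
  | nil => simp
  | cons tok rest' ih =>
    by_cases htok : tok = "no-op"
    · have hlen : ((tok :: rest').takeWhile (fun t => t == "no-op")).length
          = (rest'.takeWhile (fun t => t == "no-op")).length + 1 := by
        simp [List.takeWhile_cons, htok]
      have hdrop : (tok :: rest').dropWhile (fun t => t == "no-op")
          = rest'.dropWhile (fun t => t == "no-op") := by
        simp [List.dropWhile_cons, htok]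
      rw [bLoop, if_pos htok, ih, hlen, hdrop]
      have h1 : cur + 1 + ((rest'.takeWhile (fun t => t == "no-op")).length : Int)
          = cur + (((rest'.takeWhile (fun t => t == "no-op")).length : Nat) + 1 : Nat) := by
        push_cast; ring
      have h2 : xpos + 1 + ((rest'.takeWhile (fun t => t == "no-op")).length : Int)
          = xpos + (((rest'.takeWhile (fun t => t == "no-op")).length : Nat) + 1 : Nat) := by
        push_cast; ring
      rw [h1, h2]
    · have hb : (tok == "no-op") = false := by simp [htok]
      simp [List.takeWhile_cons, List.dropWhile_cons, hb]

theorem pvEmit_natCast (x : String) (s : Int) (n : Nat) :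
    pvEmit x s (n : Int) = (List.range n).map (fun (k : Nat) => pvChar x (s + (k : Int))) := by
  rw [pvEmit, PySem.List.pyRange_one, List.map_map]
  norm_num

theorem ite_append_singleton {α : Type} (c : Prop) [Decidable c] (a : List α) (e : α) :
    (if c then a ++ [e] else a) = a ++ (if c then [e] else []) := by
  split <;> simp

theorem bLoop_cons_other (parts : List (Int × Int)) (cur xpos start : Int) (tok : String)
    (rest : List String) (h : (tok == "no-op") = false) :
    bLoop parts cur xpos start (tok :: rest) =
      bLoop (parts ++ [(start, cur)]) 0 (if tok = "insert" then xpos else xpos + 1)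
        (if tok = "insert" then xpos else xpos + 1) rest := by
  rw [bLoop, if_neg (by simpa using h)]

-- main loop correspondence: A's outer loop (with sufficient fuel) equals B's single pass
theorem main_loop (x : String) (L : Int) :
    ∀ (fuel : Nat) (rest : List String), rest.length ≤ fuel →
      ∀ (xpos : Int) (parts : List (Int × Int)),
      outerA x L fuel rest xpos (emitAll x L parts) =
        match bLoop parts 0 xpos xpos rest with
        | (parts', cur, _, start) =>
          emitAll x L (if cur > 0 then parts' ++ [(start, cur)] else parts') := by
  intro fuel
  induction fuel with
  | zero =>
    intro rest hlen xpos parts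
    have : rest = [] := List.eq_nil_of_length_eq_zero (Nat.le_zero.mp hlen)
    subst this
    simp [outerA, bLoop, emitAll]
  | succ m ih =>
    intro rest hlen xpos parts
    match rest with
    | [] => simp [outerA, bLoop]
    | tok :: rest0 =>
      rw [bLoop_run]
      have hspec := innerA_spec x (tok :: rest0) xpos 0 []
      rw [outerA]
      cases hdw : (tok :: rest0).dropWhile (fun t => t == "no-op") with
      | nil =>
        rw [hdw] at hspec
        rw [hspec]
        simp only [zero_add, List.nil_append, hdw, bLoop]
        set n : Nat := ((tok :: rest0).takeWhile (fun t => t == "no-op")).length with hn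
        have hn0 : 0 < n := by
          rcases Nat.eq_zero_or_pos n with h0 | h
          · exfalso
            have htw : ((tok :: rest0).takeWhile (fun t => t == "no-op")) = [] :=
              List.eq_nil_of_length_eq_zero (hn ▸ h0)
            have htok : (tok == "no-op") = false := by
              by_contra hc
              simp only [Bool.not_eq_false] at hc
              simp [List.takeWhile_cons, hc] at htw
            rw [List.dropWhile_cons, htok] at hdw
            exact absurd hdw (by simp)
          · exact h
        rw [if_pos (show ((n : Int)) > 0 from by exact_mod_cast hn0), emitAll_append,
          pvEmit_natCast, ite_append_singleton]
      | cons tok2 rest' =>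
        rw [hdw] at hspec
        rw [hspec]
        simp only [zero_add, List.nil_append, hdw]
        set n : Nat := ((tok :: rest0).takeWhile (fun t => t == "no-op")).length with hn
        have htok2b : (tok2 == "no-op") = false := by
          have h2 := List.head_dropWhile_not (p := fun t => t == "no-op") (l := tok :: rest0)
            (by rw [hdw]; simp)
          simp only [hdw, List.head_cons] at h2
          exact h2
        have hlen' : rest'.length ≤ m := by
          have h5 := List.length_dropWhile_le (fun t => t == "no-op") (tok :: rest0)
          rw [hdw] at h5
          simp only [List.length_cons] at h5 hlen
          omega
        have hxa : ((if tok2 = "insert" then (xpos + (n : Int)) - 1 else (xpos + (n : Int))) + 1)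
            = (if tok2 = "insert" then xpos + (n : Int) else xpos + (n : Int) + 1) := by
          split <;> ring
        have hsol : (if L ≤ (n : Int) then emitAll x L parts ++
              [(List.range n).map (fun (k : Nat) => pvChar x (xpos + (k : Int)))]
            else emitAll x L parts)
            = emitAll x L (parts ++ [(xpos, (n : Int))]) := by
          rw [emitAll_append, pvEmit_natCast, ite_append_singleton]
        rw [hxa, hsol, bLoop_cons_other _ _ _ _ _ _ htok2b]
        exact ih rest' hlen'
          (if tok2 = "insert" then xpos + (n : Int) else xpos + (n : Int) + 1)
          (parts ++ [(xpos, (n : Int))])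

-- ===== VERDICT (by name: the statement is the Claim_ definition above) =====
theorem commonSubstrings_spec : Claim_equal_commonSubstrings := by
  intro x L a _ _
  unfold Spec_commonSubstrings commonSubstrings commonSubstrings_alt
  have h := main_loop x L a.length a le_rfl 0 []
  simpa [emitAll] using h
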